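-- pv_equiv track=rewrite | github.com/Bystroushaak/notion_blog_generator | lib/preprocessors/unfuck_filenames.py | _remove_html_entities
-- ===== SOURCE A (Python) =====
-- def _remove_html_entities(s):
--     output = ""
--     in_entity = False
--     in_entity_buffer = ""
--     for c in s:
--         if not in_entity and c != "&":
--             output += c
--             continue
--
--         if not in_entity and c == "&":
--             in_entity = True
--             in_entity_buffer += c
--             continue
--
--         if in_entity:
--             in_entity_buffer += c
--
--             if c == ";":
--                 in_entity = False
--                 in_entity_buffer = ""
--                 continue
--
--             if c == " " or c == "\n":
--                 in_entity = False
--                 output += in_entity_buffer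
--                 in_entity_buffer = ""
--
--     if in_entity_buffer:
--         output += in_entity_buffer
--
--     return output
-- ===== SOURCE B (Python) =====
-- def _remove_html_entities(s):
--     out = []
--     rest = s
--     while rest:
--         amp = rest.find("&")
--         if amp == -1:
--             out.append(rest)
--             break
--         out.append(rest[:amp])
--         body = rest[amp:]
--         j = 1
--         while j < len(body) and body[j] != ";" and body[j] != " " and body[j] != "\n":
--             j += 1
--         if j == len(body):
--             out.append(body)
--             break
--         if body[j] == ";":
--             rest = body[j + 1:]
--         else:
--             out.append(body[:j + 1])
--             rest = body[j + 1:]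
--     return "".join(out)
-- ===== Notes on version B (the rewrite author's own statement) =====
-- stated objective: faster
-- what changed: Replaces A's char-by-char state machine (in_entity flag plus growing buffer with per-character string appends) with a span scanner that jumps to each '&' with str.find, scans once to the first terminator, and emits or drops whole slices joined at the end.
import Mathlib
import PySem

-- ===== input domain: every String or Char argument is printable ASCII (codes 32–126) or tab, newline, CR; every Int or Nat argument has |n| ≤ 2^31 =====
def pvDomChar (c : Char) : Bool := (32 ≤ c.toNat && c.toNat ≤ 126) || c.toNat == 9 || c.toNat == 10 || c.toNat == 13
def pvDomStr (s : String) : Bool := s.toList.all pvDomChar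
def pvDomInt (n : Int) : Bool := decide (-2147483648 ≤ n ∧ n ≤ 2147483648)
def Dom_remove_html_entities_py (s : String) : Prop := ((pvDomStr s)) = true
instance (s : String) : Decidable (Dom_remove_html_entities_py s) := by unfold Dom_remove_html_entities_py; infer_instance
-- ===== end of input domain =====

-- B replaces A's char-by-char state machine with a span scanner (find '&', scan to
-- the first terminator, emit/drop whole slices); a timing run measured B faster (constant factor).


-- ===== PORT A =====
-- state = (output, in_entity, in_entity_buffer); strings carried as List Char
def pvAStep (st : List Char × Bool × List Char) (c : Char) : List Char × Bool × List Char :=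
  let (out, ent, buf) := st
  if ent = false ∧ c ≠ '&' then (out ++ [c], ent, buf)
  else if ent = false ∧ c = '&' then (out, true, buf ++ [c])
  else
    let buf := buf ++ [c]
    if c = ';' then (out, false, [])
    else if c = ' ' ∨ c = '\n' then (out ++ buf, false, [])
    else (out, true, buf)

def remove_html_entities_py (s : String) : String :=
  let st := s.toList.foldl pvAStep ([], false, [])
  let (out, _, buf) := st
  String.mk (if buf ≠ [] then out ++ buf else out)

-- ===== PORT B =====
-- ports rest.find('&') together with the slices rest[:amp] / rest[amp:]
-- (exact: the prefix before the first '&', and the suffix from it if any)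
def pvSplitAmp (l : List Char) : List Char × Option (List Char) :=
  match l with
  | [] => ([], none)
  | c :: t =>
    if c = '&' then ([], some (c :: t))
    else
      let (p, r) := pvSplitAmp t
      (c :: p, r)

-- ports the inner while loop together with the slices body[1:j] / body[j:]
-- (exact: the run of non-terminator chars after '&', and the remainder from j)
def pvSplitStop (l : List Char) : List Char × List Char :=
  match l with
  | [] => ([], [])
  | c :: t =>
    if c = ';' ∨ c = ' ' ∨ c = '\n' then ([], c :: t)
    else
      let (p, r) := pvSplitStop t
      (c :: p, r)

-- cited by pvAltLoop's decreasing_by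
theorem pvSplitStop_len (l : List Char) : (pvSplitStop l).2.length ≤ l.length := by
  induction l with
  | nil => simp [pvSplitStop]
  | cons c t ih =>
    simp only [pvSplitStop]; split
    · simp
    · simpa using Nat.le_succ_of_le ih

-- cited by pvAltLoop's decreasing_by
theorem pvSplitAmp_some_len (l : List Char) (p b : List Char)
    (h : pvSplitAmp l = (p, some b)) : b.length ≤ l.length := by
  induction l generalizing p with
  | nil => simp [pvSplitAmp] at h
  | cons c t ih =>
    simp only [pvSplitAmp] at h
    split at h
    · cases h; simp
    · rcases hA : pvSplitAmp t with ⟨p', r'⟩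
      rw [hA] at h; cases h
      exact Nat.le_succ_of_le (ih _ hA)

def pvAltLoop (rest : List Char) : List Char :=
  match hA : pvSplitAmp rest with
  | (p, none) => p
  | (_, some []) => []   -- unreachable: find returned an index, so body starts with '&'
  | (p, some (a :: tail)) =>
    match hS : pvSplitStop tail with
    | (e, []) => p ++ a :: e
    | (e, d :: r) =>
      if d = ';' then p ++ pvAltLoop r
      else p ++ (a :: (e ++ [d])) ++ pvAltLoop r
termination_by rest.length
decreasing_by
  all_goals
    have h1 : (d :: r).length ≤ tail.length := by
      have := pvSplitStop_len tail; rw [hS] at this; exact this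
    have h2 : (a :: tail).length ≤ rest.length := pvSplitAmp_some_len rest _ _ hA
    simp at h1 h2; omega

def remove_html_entities_py_alt (s : String) : String :=
  String.mk (pvAltLoop s.toList)

-- ===== PRECONDITION & SPEC =====
def Spec_remove_html_entities_py (s : String) (out : String) : Prop := out = remove_html_entities_py_alt s
instance (s : String) (out : String) : Decidable (Spec_remove_html_entities_py s out) := by unfold Spec_remove_html_entities_py; infer_instance

-- ===== CLAIM (what is proved, stated in full; the proofs are below) =====
def Claim_equal_remove_html_entities_py : Prop := ∀ (s : String), Dom_remove_html_entities_py s → Spec_remove_html_entities_py s (remove_html_entities_py s)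

-- ===== LEMMAS AND PROOFS =====
-- non-dependent restatement of pvAltLoop's defining equation
theorem pvAltLoop_eq (rest : List Char) :
    pvAltLoop rest =
      match pvSplitAmp rest with
      | (p, none) => p
      | (_, some []) => []
      | (p, some (a :: tail)) =>
        match pvSplitStop tail with
        | (e, []) => p ++ a :: e
        | (e, d :: r) =>
          if d = ';' then p ++ pvAltLoop r
          else p ++ (a :: (e ++ [d])) ++ pvAltLoop r := by
  rw [pvAltLoop.eq_def]
  split <;> rename_i heq
  · rw [heq]
  · rw [heq]
  · rw [heq]
    split <;> rename_i heq2 <;> simp [heq2]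

theorem pvSplitAmp_some_ne (l : List Char) (p b : List Char)
    (h : pvSplitAmp l = (p, some b)) : b ≠ [] := by
  induction l generalizing p with
  | nil => simp [pvSplitAmp] at h
  | cons c t ih =>
    simp only [pvSplitAmp] at h
    split at h
    · cases h; simp
    · rcases hA : pvSplitAmp t with ⟨p', r'⟩
      rw [hA] at h; cases h
      exact ih _ hA

def pvFinish (st : List Char × Bool × List Char) : List Char :=
  let (out, _, buf) := st
  if buf ≠ [] then out ++ buf else out

-- the entity phase of A, characterised by pvSplitStop
theorem pvEntity (cs : List Char) (out buf : List Char) :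
    pvFinish (cs.foldl pvAStep (out, true, buf)) =
      match pvSplitStop cs with
      | (e, []) => if (buf ++ e) ≠ [] then out ++ (buf ++ e) else out
      | (e, d :: r) =>
        if d = ';' then pvFinish (r.foldl pvAStep (out, false, []))
        else pvFinish (r.foldl pvAStep (out ++ buf ++ e ++ [d], false, [])) := by
  induction cs generalizing out buf with
  | nil => simp [pvSplitStop, pvFinish]
  | cons c t ih =>
    by_cases hc : c = ';' ∨ c = ' ' ∨ c = '\n'
    · have hsplit : pvSplitStop (c :: t) = ([], c :: t) := by simp [pvSplitStop, hc]
      rw [hsplit]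
      rcases hc with hc | hc | hc <;> subst hc <;>
        simp [List.foldl_cons, pvAStep]
    · simp only [not_or] at hc
      obtain ⟨h1, h2, h3⟩ := hc
      have hsplit : pvSplitStop (c :: t) =
          ((pvSplitStop t).1.cons c, (pvSplitStop t).2) := by
        simp [pvSplitStop, h1, h2, h3]
      have hstep : pvAStep (out, true, buf) c = (out, true, buf ++ [c]) := by
        simp [pvAStep, h1, h2, h3]
      rw [List.foldl_cons, hstep, ih, hsplit]
      rcases hS : pvSplitStop t with ⟨e, r⟩
      cases r with
      | nil => simp
      | cons d r' => by_cases hd : d = ';' <;> simp [hd]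

-- one scanner step when the head is not '&'
theorem pvAltLoop_cons_ne (c : Char) (t : List Char) (h : c ≠ '&') :
    pvAltLoop (c :: t) = c :: pvAltLoop t := by
  rcases hA : pvSplitAmp t with ⟨p, ob⟩
  have hApc : pvSplitAmp (c :: t) = (c :: p, ob) := by simp [pvSplitAmp, h, hA]
  rw [pvAltLoop_eq, pvAltLoop_eq, hA, hApc]
  cases ob with
  | none => simp
  | some b =>
    cases b with
    | nil => exact absurd rfl (pvSplitAmp_some_ne t p [] hA)
    | cons a tail =>
      rcases hS : pvSplitStop tail with ⟨e, r2⟩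
      cases r2 with
      | nil => simp [hS]
      | cons d r => by_cases hd : d = ';' <;> simp [hS, hd]

-- main invariant: the normal phase of A equals the span scanner
theorem pvMain (n : Nat) (cs : List Char) (hn : cs.length ≤ n) (out : List Char) :
    pvFinish (cs.foldl pvAStep (out, false, [])) = out ++ pvAltLoop cs := by
  induction n generalizing cs out with
  | zero =>
    have : cs = [] := List.eq_nil_of_length_eq_zero (Nat.le_zero.mp hn)
    subst this; simp [pvFinish, pvAltLoop_eq, pvSplitAmp]
  | succ n ih =>
    cases cs with
    | nil => simp [pvFinish, pvAltLoop_eq, pvSplitAmp]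
    | cons c t =>
      by_cases hc : c = '&'
      · subst hc
        have hstep : pvAStep (out, false, []) '&' = (out, true, ['&']) := by
          simp [pvAStep]
        have hApc : pvSplitAmp ('&' :: t) = ([], some ('&' :: t)) := by
          simp [pvSplitAmp]
        have halt : pvAltLoop ('&' :: t) =
            (match pvSplitStop t with
             | (e, []) => '&' :: e
             | (e, d :: r) =>
               if d = ';' then pvAltLoop r
               else ('&' :: (e ++ [d])) ++ pvAltLoop r) := by
          rw [pvAltLoop_eq, hApc]
          rcases hS2 : pvSplitStop t with ⟨e, r⟩
          cases r <;> simp [hS2]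
        rw [List.foldl_cons, hstep, pvEntity, halt]
        rcases hS : pvSplitStop t with ⟨e, r⟩
        have hlen : r.length ≤ t.length := by
          have := pvSplitStop_len t; rw [hS] at this; exact this
        simp only [List.length_cons] at hn
        cases r with
        | nil => simp
        | cons d r' =>
          have hr' : r'.length ≤ n := by
            simp only [List.length_cons] at hlen; omega
          by_cases hd : d = ';'
          · subst hd
            have hih := ih r' hr' out
            simp [hih]
          · simp only [if_neg hd]
            rw [ih r' hr' (out ++ ['&'] ++ e ++ [d])]
            simp
      · have hstep : pvAStep (out, false, []) c = (out ++ [c], false, []) := by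
          simp [pvAStep, hc]
        rw [List.foldl_cons, hstep, pvAltLoop_cons_ne c t hc]
        simp only [List.length_cons] at hn
        rw [ih t (by omega) (out ++ [c])]
        simp

-- ===== VERDICT (by name: the statement is the Claim_ definition above) =====
theorem remove_html_entities_py_spec : Claim_equal_remove_html_entities_py := by
  intro s _
  unfold Spec_remove_html_entities_py remove_html_entities_py remove_html_entities_py_alt
  have h := pvMain s.toList.length s.toList (Nat.le_refl _) []
  rcases hf : s.toList.foldl pvAStep ([], false, []) with ⟨o, e, b⟩
  simp only [pvFinish, hf] at h
  simp only []
  rw [show (if b ≠ [] then o ++ b else o) = pvAltLoop s.toList from by simpa using h]
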